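-- pv_equiv track=rewrite | github.com/ShaktiDandapani/Python | Problems/Edabit/Expert/SubsConsonantVowelGroups/cons_vowels_substrings.py | get_vowel_substrings
-- ===== SOURCE A (Python) =====
-- _vowels = ["a", "e", "i", "o", "u"]
--
-- def get_vowel_substrings(o_input_word):
-- 	unique_word_list = []
--
-- 	# 1. Convert input word into a list of characters
-- 	input_word = list(o_input_word) # is this necessary ?
-- 	word_found = False
--
-- 	# Looping to obtain all substrings
-- 	for i in range(0, len(input_word)):
-- 		u_word = []
-- 		if input_word[i] in _vowels:
-- 			while word_found == False:
-- 				for j in range(i, len(input_word)):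
-- 					u_word.append(input_word[j])
-- 					if input_word[j] in _vowels:
-- 						# Stop
-- 						word = "".join(u_word)
-- 						unique_word_list.append(str(word))
-- 						word_found = True
-- 		word_found = False
--
-- 	# To add the character if it is in the vowels list
-- 	for character in input_word:
-- 		if character in _vowels:
-- 			unique_word_list.append(character)
--
-- 	unique_word_list = sorted(list(set(unique_word_list)))
-- 	return unique_word_list
-- ===== SOURCE B (Python) =====
-- def get_vowel_substrings(o_input_word):
--     chars = list(o_input_word)
--     vowels = set('aeiou')
--     idx = [k for k, c in enumerate(chars) if c in vowels]
--     subs = {''.join(chars[a:b + 1]) for a in idx for b in idx if b >= a}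
--     return sorted(subs)
-- ===== Notes on version B (the rewrite author's own statement) =====
-- stated objective: simpler
-- what changed: B precomputes the list of vowel positions once and builds the set of substrings by a double loop over those positions only, instead of A's per-index inner rescan of every trailing character with the word_found flag machinery.
import Mathlib
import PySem

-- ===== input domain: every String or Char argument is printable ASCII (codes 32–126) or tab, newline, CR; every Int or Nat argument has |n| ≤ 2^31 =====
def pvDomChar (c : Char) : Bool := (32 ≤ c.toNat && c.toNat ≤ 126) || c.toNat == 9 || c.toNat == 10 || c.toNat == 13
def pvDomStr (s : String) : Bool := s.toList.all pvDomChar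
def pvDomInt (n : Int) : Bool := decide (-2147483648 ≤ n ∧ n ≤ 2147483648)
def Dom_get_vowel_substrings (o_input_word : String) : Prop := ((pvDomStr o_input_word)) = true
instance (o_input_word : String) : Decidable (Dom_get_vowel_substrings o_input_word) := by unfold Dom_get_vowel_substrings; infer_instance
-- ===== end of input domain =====

-- B replaces A's per-position inner scans by a double loop over precomputed vowel positions; objective: simpler.


-- ===== PORT A =====
-- _vowels = ["a","e","i","o","u"]; Python compares 1-character strings, ported as Chars
def pvVowels : List Char := ['a', 'e', 'i', 'o', 'u']

-- one iteration of A's inner 'for j' loop: u_word.append(input_word[j]); if vowel: unique_word_list.append("".join(u_word))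
def pvStepA (cw : List Char) (st : List Char × List String) (j : Nat) : List Char × List String :=
  let u := st.1 ++ [cw.getD j 'a']
  if cw.getD j 'a' ∈ pvVowels then (u, st.2 ++ [String.mk u]) else (u, st.2)

-- A's 'while word_found == False' body: since input_word[i] is a vowel, word_found becomes True
-- during the first 'for j' pass (at j = i), so the while runs that pass exactly once; the for loop itself runs to the end.
def pvInnerA (cw : List Char) (i : Nat) : List String :=
  ((List.range' i (cw.length - i)).foldl (pvStepA cw) ([], [])).2

def get_vowel_substrings (o_input_word : String) : List String :=
  let input_word := o_input_word.toList
  -- for i in range(0, len(input_word)): if input_word[i] in _vowels: <inner while/for>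
  let ul1 := (List.range input_word.length).foldl
    (fun acc i => if input_word.getD i 'a' ∈ pvVowels then acc ++ pvInnerA input_word i else acc) []
  -- for character in input_word: if character in _vowels: unique_word_list.append(character)
  let ul2 := input_word.foldl
    (fun acc c => if c ∈ pvVowels then acc ++ [String.mk [c]] else acc) ul1
  -- sorted(list(set(unique_word_list)))
  PySem.List.sorted (PySem.Set.ofList ul2) (fun x => x) false

-- ===== PORT B =====
def get_vowel_substrings_alt (o_input_word : String) : List String :=
  let chars := o_input_word.toList
  let vowels : PySem.Set Char := PySem.Set.ofList "aeiou".toList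
  -- idx = [k for k, c in enumerate(chars) if c in vowels]
  let idx : List Int :=
    (PySem.List.enumerate chars 0).filterMap (fun p => if p.2 ∈ vowels then some p.1 else none)
  -- subs = {''.join(chars[a:b+1]) for a in idx for b in idx if b >= a}
  let subs : PySem.Set String := PySem.Set.ofList
    (idx.flatMap (fun a =>
      (idx.filter (fun b => decide (a ≤ b))).map
        (fun b => String.mk (PySem.List.slice chars (some a) (some (b + 1))))))
  -- sorted(subs)
  PySem.List.sorted subs (fun x => x) false

-- ===== PRECONDITION & SPEC =====
def Spec_get_vowel_substrings (o_input_word : String) (out : List String) : Prop := out = get_vowel_substrings_alt o_input_word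
instance (o_input_word : String) (out : List String) : Decidable (Spec_get_vowel_substrings o_input_word out) := by unfold Spec_get_vowel_substrings; infer_instance

-- ===== CLAIM (what is proved, stated in full; the proofs are below) =====
def Claim_equal_get_vowel_substrings : Prop := ∀ (o_input_word : String), Dom_get_vowel_substrings o_input_word → Spec_get_vowel_substrings o_input_word (get_vowel_substrings o_input_word)

-- ===== LEMMAS AND PROOFS =====

-- the list A accumulates before set/sorted, written with filter/flatMap/map
def pvLA (cw : List Char) : List String :=
  ((List.range cw.length).filter (fun i => decide (cw.getD i 'a' ∈ pvVowels))).flatMap (pvInnerA cw)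
    ++ (cw.filter (fun c => decide (c ∈ pvVowels))).map (fun c => String.mk [c])

-- the list B feeds to the set, likewise
def pvIdx (cw : List Char) : List Int :=
  (PySem.List.enumerate cw 0).filterMap
    (fun p => if p.2 ∈ (PySem.Set.ofList "aeiou".toList : PySem.Set Char) then some p.1 else none)

def pvLB (cw : List Char) : List String :=
  (pvIdx cw).flatMap (fun a =>
    ((pvIdx cw).filter (fun b => decide (a ≤ b))).map
      (fun b => String.mk (PySem.List.slice cw (some a) (some (b + 1)))))

-- both programs' elements are exactly the vowel-to-vowel substrings
def pvCanon (cw : List Char) (s : String) : Prop :=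
  ∃ i j : Nat, i ≤ j ∧ j < cw.length ∧ cw.getD i 'a' ∈ pvVowels ∧ cw.getD j 'a' ∈ pvVowels ∧
    s = String.mk ((cw.drop i).take (j + 1 - i))

lemma pvA_eq (o : String) :
    get_vowel_substrings o = PySem.List.sorted (PySem.Set.ofList (pvLA o.toList)) (fun x => x) false := by
  simp only [get_vowel_substrings, pvLA]
  rw [PySem.List.foldl_append_ite (p := fun c => c ∈ pvVowels) (f := fun c => String.mk [c]),
    PySem.List.foldl_ite_eq_foldl_filter (p := fun i => o.toList.getD i 'a' ∈ pvVowels)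
      (f := fun acc i => acc ++ pvInnerA o.toList i),
    PySem.List.foldl_append_eq_flatMap]
  simp

lemma pvB_eq (o : String) :
    get_vowel_substrings_alt o = PySem.List.sorted (PySem.Set.ofList (pvLB o.toList)) (fun x => x) false := by
  simp only [get_vowel_substrings_alt, pvLB, pvIdx]

lemma pv_inner_fold (cw : List Char) : ∀ (m s : Nat) (u : List Char) (out : List String),
    (List.range' s m).foldl (pvStepA cw) (u, out) =
      (u ++ (List.range' s m).map (fun j => cw.getD j 'a'),
       out ++ ((List.range' s m).filter (fun j => decide (cw.getD j 'a' ∈ pvVowels))).map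
         (fun j => String.mk (u ++ (List.range' s (j + 1 - s)).map (fun k => cw.getD k 'a')))) := by
  intro m
  induction m with
  | zero => intro s u out; simp [List.range']
  | succ m ih =>
    intro s u out
    rw [List.range'_succ]
    by_cases h : cw.getD s 'a' ∈ pvVowels
    · simp only [List.foldl_cons, pvStepA, if_pos h, List.filter_cons, decide_eq_true h, ih]
      refine Prod.ext (by simp) ?_
      simp only [if_true]
      have hs1 : s + 1 - s = 1 := by omega
      have hmap : ∀ j ∈ (List.range' (s+1) m).filter (fun j => decide (cw.getD j 'a' ∈ pvVowels)),
          String.mk ((u ++ [cw.getD s 'a']) ++ (List.range' (s+1) (j + 1 - (s+1))).map (fun k => cw.getD k 'a'))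
          = String.mk (u ++ (List.range' s (j + 1 - s)).map (fun k => cw.getD k 'a')) := by
        intro j hj
        have hj' : j ∈ List.range' (s+1) m := List.mem_of_mem_filter hj
        have hs : s + 1 ≤ j := (List.mem_range'_1.mp hj').1
        have h1 : j + 1 - s = (j - s) + 1 := by omega
        have h2 : j + 1 - (s + 1) = j - s := by omega
        rw [h1, h2, List.range'_succ]
        simp
      rw [List.map_cons, List.map_congr_left hmap, hs1]
      have hr1 : (List.range' s 1).map (fun k => cw.getD k 'a') = [cw.getD s 'a'] := by simp
      rw [hr1]
      simp
    · simp only [List.foldl_cons, pvStepA, if_neg h, List.filter_cons, decide_eq_false h, ih]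
      refine Prod.ext (by simp) ?_
      simp only [Bool.false_eq_true, if_false]
      have hmap : ∀ j ∈ (List.range' (s+1) m).filter (fun j => decide (cw.getD j 'a' ∈ pvVowels)),
          String.mk ((u ++ [cw.getD s 'a']) ++ (List.range' (s+1) (j + 1 - (s+1))).map (fun k => cw.getD k 'a'))
          = String.mk (u ++ (List.range' s (j + 1 - s)).map (fun k => cw.getD k 'a')) := by
        intro j hj
        have hj' : j ∈ List.range' (s+1) m := List.mem_of_mem_filter hj
        have hs : s + 1 ≤ j := (List.mem_range'_1.mp hj').1
        have h1 : j + 1 - s = (j - s) + 1 := by omega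
        have h2 : j + 1 - (s + 1) = j - s := by omega
        rw [h1, h2, List.range'_succ]
        simp
      rw [List.map_congr_left hmap]

lemma pv_map_getD_range' (cw : List Char) : ∀ (m i : Nat), i + m ≤ cw.length →
    (List.range' i m).map (fun k => cw.getD k 'a') = (cw.drop i).take m := by
  intro m
  induction m with
  | zero => intro i _; simp
  | succ m ih =>
    intro i hle
    have hi : i < cw.length := by omega
    rw [List.range'_succ, List.map_cons, List.drop_eq_getElem_cons hi, List.take_succ_cons,
      List.getD_eq_getElem cw 'a' hi, ih (i+1) (by omega)]

lemma pv_mem_inner (cw : List Char) (i : Nat) (s : String) :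
    s ∈ pvInnerA cw i ↔ ∃ j, i ≤ j ∧ j < cw.length ∧ cw.getD j 'a' ∈ pvVowels ∧
      s = String.mk ((List.range' i (j + 1 - i)).map (fun k => cw.getD k 'a')) := by
  unfold pvInnerA
  rw [pv_inner_fold]
  simp only [List.nil_append, List.mem_map, List.mem_filter, List.mem_range'_1, decide_eq_true_eq]
  constructor
  · rintro ⟨j, ⟨⟨hij, hjn⟩, hv⟩, rfl⟩
    exact ⟨j, hij, by omega, hv, rfl⟩
  · rintro ⟨j, hij, hjn, hv, rfl⟩
    exact ⟨j, ⟨⟨hij, by omega⟩, hv⟩, rfl⟩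

lemma pv_memA (cw : List Char) (s : String) : s ∈ pvLA cw ↔ pvCanon cw s := by
  unfold pvLA pvCanon
  simp only [List.mem_append, List.mem_flatMap, List.mem_map, List.mem_filter, List.mem_range,
    decide_eq_true_eq]
  constructor
  · rintro (⟨i, ⟨hin, hvi⟩, hs⟩ | ⟨c, ⟨hc, hvc⟩, rfl⟩)
    · obtain ⟨j, hij, hjn, hvj, rfl⟩ := (pv_mem_inner cw i s).mp hs
      refine ⟨i, j, hij, hjn, hvi, hvj, ?_⟩
      rw [pv_map_getD_range' cw (j + 1 - i) i (by omega)]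
    · obtain ⟨k, hk, rfl⟩ := List.mem_iff_getElem.mp hc
      refine ⟨k, k, le_refl k, hk, ?_, ?_, ?_⟩
      · rw [List.getD_eq_getElem cw 'a' hk]; exact hvc
      · rw [List.getD_eq_getElem cw 'a' hk]; exact hvc
      · rw [show k + 1 - k = 1 from by omega]
        congr 1
        rw [show List.drop k cw = cw[k] :: List.drop (k+1) cw from List.drop_eq_getElem_cons hk,
          List.take_succ_cons, List.take_zero]
  · rintro ⟨i, j, hij, hjn, hvi, hvj, rfl⟩
    left
    refine ⟨i, ⟨by omega, hvi⟩, ?_⟩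
    rw [pv_mem_inner]
    refine ⟨j, hij, hjn, hvj, ?_⟩
    rw [pv_map_getD_range' cw (j + 1 - i) i (by omega)]

lemma pv_mem_idx (cw : List Char) (a : Int) :
    a ∈ pvIdx cw ↔ ∃ k : Nat, k < cw.length ∧ a = (k : Int) ∧ cw.getD k 'a' ∈ pvVowels := by
  unfold pvIdx
  have hv : (PySem.Set.ofList "aeiou".toList : List Char) = pvVowels := by decide
  simp only [List.mem_filterMap, hv]
  constructor
  · rintro ⟨p, hp, hpa⟩
    obtain ⟨k, hk, rfl⟩ := (PySem.List.mem_enumerate_iff _ _ _).mp hp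
    by_cases h : cw[k] ∈ pvVowels
    · rw [if_pos h] at hpa
      refine ⟨k, hk, by simpa using hpa.symm, ?_⟩
      rw [List.getD_eq_getElem cw 'a' hk]; exact h
    · rw [if_neg h] at hpa; exact absurd hpa (by simp)
  · rintro ⟨k, hk, rfl, hv'⟩
    refine ⟨((0 : Int) + k, cw[k]), (PySem.List.mem_enumerate_iff _ _ _).mpr ⟨k, hk, rfl⟩, ?_⟩
    rw [if_pos (by rwa [List.getD_eq_getElem cw 'a' hk] at hv')]
    simp

lemma pv_memB (cw : List Char) (s : String) : s ∈ pvLB cw ↔ pvCanon cw s := by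
  unfold pvLB pvCanon
  simp only [List.mem_flatMap, List.mem_map, List.mem_filter, decide_eq_true_eq, pv_mem_idx]
  constructor
  · rintro ⟨a, ⟨i, hin, rfl, hvi⟩, b, ⟨⟨j, hjn, rfl, hvj⟩, hab⟩, rfl⟩
    have hij : i ≤ j := by exact_mod_cast hab
    refine ⟨i, j, hij, hjn, hvi, hvj, ?_⟩
    have hc : ((j : Int) + 1) = ((j + 1 : Nat) : Int) := by push_cast; ring
    rw [hc, PySem.List.slice_natCast]
  · rintro ⟨i, j, hij, hjn, hvi, hvj, rfl⟩
    refine ⟨(i : Int), ⟨i, by omega, rfl, hvi⟩, ⟨(j : Int), ⟨⟨j, hjn, rfl, hvj⟩, by exact_mod_cast hij⟩, ?_⟩⟩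
    have hc : ((j : Int) + 1) = ((j + 1 : Nat) : Int) := by push_cast; ring
    rw [hc, PySem.List.slice_natCast]

-- ===== VERDICT (by name: the statement is the Claim_ definition above) =====
theorem get_vowel_substrings_spec : Claim_equal_get_vowel_substrings := by
  intro o _
  unfold Spec_get_vowel_substrings
  rw [pvA_eq, pvB_eq]
  apply (PySem.List.sorted_id_eq_sorted_id_iff_perm _ _).mpr
  apply (List.perm_ext_iff_of_nodup (PySem.Set.nodup_ofList _) (PySem.Set.nodup_ofList _)).mpr
  intro s
  rw [PySem.Set.mem_ofList, PySem.Set.mem_ofList, pv_memA, pv_memB]
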